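-- pv_equiv track=rewrite | github.com/sdebnathusc/CTRL-C | run_ctrlc.py | split_tasks
-- ===== SOURCE A (Python) =====
-- from typing import List, Any
--
-- def split_tasks(tasks: List[Any], num_workers: int) -> List[List[Any]]:
--     """ Split a list of tasks up into equal-ish sized chunks """
--     # Figure out how many tasks each worker should handle. We want to split as
--     # evenly as possible, so the difference in number of tasks per worker
--     # varies by at most one. We first split evenly (rounding down) then go back
--     # and assign one extra task per worker as needed.
--     tasks_per_worker = [len(tasks) // num_workers for _ in range(num_workers)]
--     for i in range(num_workers):
--         if sum(tasks_per_worker) == len(tasks):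
--             break
--         tasks_per_worker[i] += 1
--     assert sum(tasks_per_worker) == len(tasks)
--
--     # Now actually split tasks
--     sharded_tasks = [[]]
--     for task in tasks:
--         worker_idx = len(sharded_tasks) - 1
--         if len(sharded_tasks[worker_idx]) == tasks_per_worker[worker_idx]:
--             sharded_tasks.append([])
--         sharded_tasks[-1].append(task)
--     for num, shard in zip(tasks_per_worker, sharded_tasks):
--         assert num == len(shard)
--
--     return sharded_tasks
-- ===== SOURCE B (Python) =====
-- from typing import List, Any
--
-- def split_tasks(tasks: List[Any], num_workers: int) -> List[List[Any]]:
--     """Split a list of tasks up into equal-ish sized chunks (slice by chunk size)."""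
--     if not tasks:
--         return [[]]
--     q, r = divmod(len(tasks), num_workers)
--     out, start = [], 0
--     for i in range(num_workers):
--         if start >= len(tasks):
--             break
--         size = q + 1 if i < r else q
--         out.append(tasks[start:start + size])
--         start += size
--     return out
-- ===== Notes on version B (the rewrite author's own statement) =====
-- stated objective: faster
-- what changed: B computes quotient and remainder once with divmod and emits each worker's chunk as a single slice by cumulative offset, instead of A's per-worker adjustment loop that re-sums the size list each iteration and A's element-by-element fold that grows the last shard one task at a time.
import Mathlib
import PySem

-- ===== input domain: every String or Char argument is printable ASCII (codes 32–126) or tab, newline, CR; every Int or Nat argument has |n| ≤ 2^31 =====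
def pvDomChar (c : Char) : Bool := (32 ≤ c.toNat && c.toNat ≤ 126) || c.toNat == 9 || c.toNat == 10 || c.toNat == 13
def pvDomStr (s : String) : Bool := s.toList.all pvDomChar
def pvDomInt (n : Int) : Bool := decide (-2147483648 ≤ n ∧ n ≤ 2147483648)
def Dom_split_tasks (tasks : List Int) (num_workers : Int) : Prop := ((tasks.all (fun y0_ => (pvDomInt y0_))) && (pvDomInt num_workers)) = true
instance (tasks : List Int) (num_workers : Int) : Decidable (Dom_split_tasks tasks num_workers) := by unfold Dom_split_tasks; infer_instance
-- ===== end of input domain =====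

-- B replaces A's per-worker adjustment loop (which re-sums the size list every iteration) and
-- A's task-by-task fold with a single divmod and one slice per worker.

-- ===== PORT A =====
-- for i in range(num_workers): if sum(tasks_per_worker) == len(tasks): break; tasks_per_worker[i] += 1
-- (i comes from range(num_workers), hence is nonnegative, so i.toNat is exact)
def aAdjust (n : Int) : List Int → List Int → List Int
  | [], tpw => tpw
  | i :: is, tpw => if tpw.foldl (· + ·) 0 = n then tpw else aAdjust n is (tpw.modify i.toNat (· + 1))

-- sharded_tasks[-1].append(task)  (sharded_tasks is never empty)
def appendLastA (sh : List (List Int)) (t : Int) : List (List Int) :=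
  sh.dropLast ++ [(sh.getLastD []) ++ [t]]

-- for task in tasks: ...  (worker_idx = len(sharded_tasks) - 1 indexes the last shard; within
-- Pre_ the index into tasks_per_worker is always in range, so pyGetD's default is never used)
def aShard (tpw : List Int) : List (List Int) → List Int → List (List Int)
  | sh, [] => sh
  | sh, t :: ts =>
      let sh' := if ((sh.getLastD []).length : Int) = PySem.List.pyGetD tpw ((sh.length : Int) - 1) 0
                 then sh ++ [[]] else sh
      aShard tpw (appendLastA sh' t) ts

-- the two asserts of A hold on every input Pre_ admits and are not ported
def split_tasks (tasks : List Int) (num_workers : Int) : List (List Int) :=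
  let n : Int := tasks.length
  let tpw0 := (PySem.List.pyRange 0 num_workers 1).map (fun _ => PySem.Int.floordiv n num_workers)
  let tpw := aAdjust n (PySem.List.pyRange 0 num_workers 1) tpw0
  aShard tpw [[]] tasks

-- ===== PORT B =====
-- for i in range(num_workers): if start >= len(tasks): break;
--   size = q + 1 if i < r else q; out.append(tasks[start:start+size]); start += size
def bLoop (tasks : List Int) (q r : Int) : List Int → List (List Int) → Int → List (List Int)
  | [], out, _ => out
  | i :: is, out, start =>
      if (tasks.length : Int) ≤ start then out
      else
        let size := if i < r then q + 1 else q
        bLoop tasks q r is (out ++ [PySem.List.slice tasks (some start) (some (start + size))]) (start + size)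

def split_tasks_alt (tasks : List Int) (num_workers : Int) : List (List Int) :=
  if tasks = [] then [[]]
  else
    let n : Int := tasks.length
    let q := PySem.Int.floordiv n num_workers
    let r := PySem.Int.mod n num_workers
    bLoop tasks q r (PySem.List.pyRange 0 num_workers 1) [] 0

-- ===== PRECONDITION & SPEC =====
-- Pre_ excludes only inputs on which A raises: num_workers ≤ 0 with a nonempty task list
-- (ZeroDivisionError for num_workers = 0, AssertionError for negative num_workers);
-- for an empty task list A returns [[]] for every num_workers, so those inputs stay inside.
def Pre_split_tasks (tasks : List Int) (num_workers : Int) : Prop :=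
  1 ≤ num_workers ∨ tasks = []
instance (tasks : List Int) (num_workers : Int) : Decidable (Pre_split_tasks tasks num_workers) := by
  unfold Pre_split_tasks; infer_instance

def pvWitness_split_tasks : List Int × Int := ([1, 2, 3], 2)

def Spec_split_tasks (tasks : List Int) (num_workers : Int) (out : List (List Int)) : Prop := out = split_tasks_alt tasks num_workers
instance (tasks : List Int) (num_workers : Int) (out : List (List Int)) : Decidable (Spec_split_tasks tasks num_workers out) := by unfold Spec_split_tasks; infer_instance

-- ===== CLAIM (what is proved, stated in full; the proofs are below) =====
def Claim_equal_split_tasks : Prop := ∀ (tasks : List Int) (num_workers : Int), Dom_split_tasks tasks num_workers → Pre_split_tasks tasks num_workers → Spec_split_tasks tasks num_workers (split_tasks tasks num_workers)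

-- ===== LEMMAS AND PROOFS =====

-- partial-chunk view of A's sharding fold: fill the current chunk to its stated size, then open a new one
def fillF : List Int → List Int → List Int → List (List Int)
  | _, cur, [] => [cur]
  | sizes, cur, t :: ts =>
      if (cur.length : Int) = sizes.headD 0 then cur :: fillF sizes.tail [t] ts
      else fillF sizes (cur ++ [t]) ts

-- chunk-at-a-time view of B's loop
def chunksB : List Int → List Int → List (List Int)
  | _, [] => []
  | [], _ :: _ => []
  | s :: ss, xs => xs.take s.toNat :: chunksB ss (xs.drop s.toNat)

-- the size list covers the remaining length, every size still needed being ≥ 1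
def Good : List Int → Nat → Prop
  | _, 0 => True
  | [], _ => False
  | s :: ss, L => 1 ≤ s ∧ Good ss (L - s.toNat)

theorem getD_eq_headD_drop (xs : List Int) (k : Nat) (d : Int) : xs.getD k d = (xs.drop k).headD d := by
  induction xs generalizing k with
  | nil => simp
  | cons x xs ih => cases k with
    | zero => simp
    | succ k => simpa using ih k

theorem aShard_eq_fill (tpw : List Int) (xs : List Int) :
    ∀ (done : List (List Int)) (cur : List Int),
      aShard tpw (done ++ [cur]) xs = done ++ fillF (tpw.drop done.length) cur xs := by
  induction xs with
  | nil => intro done cur; simp [aShard, fillF]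
  | cons t ts ih =>
      intro done cur
      have hidx : PySem.List.pyGetD tpw (((done ++ [cur]).length : Int) - 1) 0
          = (tpw.drop done.length).headD 0 := by
        have h1 : ((done ++ [cur]).length : Int) - 1 = ((done.length : Nat) : Int) := by
          simp only [List.length_append, List.length_cons, List.length_nil]
          push_cast
          ring
        rw [h1, PySem.List.pyGetD_natCast, getD_eq_headD_drop]
      simp only [aShard, fillF, hidx, List.getLastD_concat]
      by_cases hfull : ((cur.length : Int)) = (tpw.drop done.length).headD 0
      · simp only [hfull, if_true]
        have happ : appendLastA (done ++ [cur] ++ [[]]) t = (done ++ [cur]) ++ [[t]] := by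
          simp [appendLastA]
        rw [happ, ih (done ++ [cur]) [t]]
        simp [List.tail_drop]
      · simp only [if_neg hfull]
        have happ : appendLastA (done ++ [cur]) t = done ++ [cur ++ [t]] := by
          simp [appendLastA]
        rw [happ, ih done (cur ++ [t])]

theorem good_nil_succ {L : Nat} (h : Good [] (L + 1)) : False := h

theorem good_zero (l : List Int) : Good l 0 := by cases l <;> trivial

theorem good_cons {s : Int} {ss : List Int} {L : Nat} (h : Good (s :: ss) (L + 1)) :
    1 ≤ s ∧ Good ss (L + 1 - s.toNat) := h

theorem good_cons' {s : Int} {ss : List Int} {L : Nat} (h : 1 ≤ s ∧ Good ss (L + 1 - s.toNat)) :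
    Good (s :: ss) (L + 1) := h

theorem good_head {ss : List Int} {L : Nat} (h : Good ss (L + 1)) : 1 ≤ ss.headD 0 := by
  cases ss with
  | nil => exact absurd h good_nil_succ
  | cons s ss => exact (good_cons h).1

theorem chunksB_of_ne {s : Int} {ss : List Int} {xs : List Int} (h : xs ≠ []) :
    chunksB (s :: ss) xs = xs.take s.toNat :: chunksB ss (xs.drop s.toNat) := by
  cases xs with
  | nil => exact absurd rfl h
  | cons z zs => rfl

theorem chunksB_nil (ss : List Int) : chunksB ss [] = [] := by cases ss <;> rfl

theorem fill_eq_chunks (xs : List Int) :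
    ∀ (sizes : List Int) (cur : List Int), cur ++ xs ≠ [] →
      Good sizes (cur.length + xs.length) → (cur.length : Int) ≤ sizes.headD 0 →
      fillF sizes cur xs = chunksB sizes (cur ++ xs) := by
  induction xs with
  | nil =>
      intro sizes cur hne hg hle
      have hc : cur ≠ [] := by simpa using hne
      obtain ⟨m, hm⟩ : ∃ m, cur.length = m + 1 := by
        cases cur with
        | nil => exact absurd rfl hc
        | cons a l => exact ⟨l.length, by simp⟩
      have hg' : Good sizes (m + 1) := by
        have h0 : cur.length + List.length ([] : List Int) = m + 1 := by simp [hm]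
        rwa [h0] at hg
      obtain ⟨s, ss, rfl⟩ : ∃ s ss, sizes = s :: ss := by
        cases sizes with
        | nil => exact absurd hg' good_nil_succ
        | cons s ss => exact ⟨s, ss, rfl⟩
      have hs1 : 1 ≤ s := (good_cons hg').1
      have hle' : (cur.length : Int) ≤ s := by simpa using hle
      have hlen : cur.length ≤ s.toNat := by omega
      rw [show fillF (s :: ss) cur [] = [cur] from rfl, List.append_nil,
        chunksB_of_ne hc, List.take_of_length_le hlen, List.drop_eq_nil_of_le hlen,
        chunksB_nil]
  | cons t ts ih =>
      intro sizes cur hne hg hle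
      have hg1 : Good sizes (cur.length + ts.length + 1) := hg
      obtain ⟨s, ss, rfl⟩ : ∃ s ss, sizes = s :: ss := by
        cases sizes with
        | nil => exact absurd hg1 good_nil_succ
        | cons s ss => exact ⟨s, ss, rfl⟩
      have hgc := good_cons hg1
      have hle' : (cur.length : Int) ≤ s := by simpa using hle
      by_cases hfull : (cur.length : Int) = s
      · have hsn : s.toNat = cur.length := by omega
        have hg2 : Good ss (1 + ts.length) := by
          have h2 := hgc.2
          rw [hsn] at h2
          rw [show 1 + ts.length = cur.length + ts.length + 1 - cur.length by omega]
          exact h2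
        have hg2' : Good ss (ts.length + 1) := by rwa [Nat.add_comm] at hg2
        have hrec := ih ss [t] (by simp) hg2 (by simpa using good_head hg2')
        rw [show fillF (s :: ss) cur (t :: ts) =
              (if (cur.length : Int) = (s :: ss).headD 0 then cur :: fillF (s :: ss).tail [t] ts
               else fillF (s :: ss) (cur ++ [t]) ts) from rfl]
        rw [List.headD_cons, if_pos hfull, List.tail_cons, hrec,
          chunksB_of_ne (by simp : cur ++ t :: ts ≠ []), hsn,
          List.take_left, List.drop_left]
        rfl
      · have hlt : (cur.length : Int) < s := lt_of_le_of_ne hle' hfull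
        have hglen : (cur ++ [t]).length + ts.length = cur.length + ts.length + 1 := by
          simp only [List.length_append, List.length_cons, List.length_nil]
          omega
        have hrec := ih (s :: ss) (cur ++ [t])
          (by simp)
          (by rw [hglen]; exact hg1)
          (by
            simp only [List.headD_cons, List.length_append, List.length_cons, List.length_nil]
            push_cast
            omega)
        rw [show fillF (s :: ss) cur (t :: ts) =
              (if (cur.length : Int) = (s :: ss).headD 0 then cur :: fillF (s :: ss).tail [t] ts
               else fillF (s :: ss) (cur ++ [t]) ts) from rfl]
        rw [List.headD_cons, if_neg hfull, hrec, List.append_assoc, List.singleton_append]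

theorem chunksB_nil_sizes (xs : List Int) : chunksB [] xs = [] := by cases xs <;> rfl

theorem slice_nonneg (xs : List Int) (a b : Int) (ha : 0 ≤ a) (hb : 0 ≤ b) :
    PySem.List.slice xs (some a) (some (a + b)) = (xs.drop a.toNat).take b.toNat := by
  obtain ⟨a', rfl⟩ : ∃ a' : Nat, a = (a' : Int) := ⟨a.toNat, by omega⟩
  obtain ⟨b', rfl⟩ : ∃ b' : Nat, b = (b' : Int) := ⟨b.toNat, by omega⟩
  rw [PySem.List.slice_natCast_add]
  simp

theorem bLoop_eq (tasks : List Int) (q r : Int) (hq : 0 ≤ q) :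
    ∀ (is : List Int) (out : List (List Int)) (start : Int), 0 ≤ start →
      bLoop tasks q r is out start
        = out ++ chunksB (is.map (fun i => if i < r then q + 1 else q)) (tasks.drop start.toNat) := by
  intro is
  induction is with
  | nil =>
      intro out start h
      rw [show bLoop tasks q r [] out start = out from rfl, List.map_nil,
        chunksB_nil_sizes, List.append_nil]
  | cons i is ih =>
      intro out start hstart
      rw [show bLoop tasks q r (i :: is) out start =
          (if (tasks.length : Int) ≤ start then out
           else bLoop tasks q r is
             (out ++ [PySem.List.slice tasks (some start) (some (start + (if i < r then q + 1 else q)))])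
             (start + (if i < r then q + 1 else q))) from rfl]
      by_cases hbr : (tasks.length : Int) ≤ start
      · have hdrop : tasks.drop start.toNat = [] := by
          apply List.drop_eq_nil_of_le
          omega
        rw [if_pos hbr, hdrop, chunksB_nil, List.append_nil]
      · have hlt : start < (tasks.length : Int) := by omega
        have hsz : (0 : Int) ≤ (if i < r then q + 1 else q) := by split <;> omega
        have hdne : tasks.drop start.toNat ≠ [] := by
          intro h
          have := List.drop_eq_nil_iff.mp h
          omega
        have hdd : (tasks.drop start.toNat).drop (if i < r then q + 1 else q).toNat
            = tasks.drop (start + (if i < r then q + 1 else q)).toNat := by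
          rw [List.drop_drop]
          congr 1
          omega
        rw [if_neg hbr, ih _ (start + _) (by omega),
          List.map_cons, chunksB_of_ne hdne, slice_nonneg tasks start _ hstart hsz, hdd,
          List.append_assoc, List.singleton_append]

theorem modify_append_cons (l₁ : List Int) (a : Int) (l₂ : List Int) (f : Int → Int) :
    (l₁ ++ a :: l₂).modify l₁.length f = l₁ ++ f a :: l₂ := by
  induction l₁ with
  | nil => rfl
  | cons x l ih => simp only [List.cons_append, List.length_cons, List.modify_succ_cons, ih]

theorem sum_rep_rep (a b : Nat) (x y : Int) :
    (List.replicate a x ++ List.replicate b y).sum = (a : Int) * x + (b : Int) * y := by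
  simp [List.sum_append, List.sum_replicate]

theorem range_map_split (R : Nat) : ∀ (W : Nat) (x y : Int), R ≤ W →
    (List.range W).map (fun k => if k < R then x else y)
      = List.replicate R x ++ List.replicate (W - R) y := by
  induction R with
  | zero =>
      intro W x y _
      simp
  | succ R ih =>
      intro W x y hRW
      obtain ⟨W', rfl⟩ : ∃ W', W = W' + 1 := ⟨W - 1, by omega⟩
      rw [List.range_succ_eq_map, List.map_cons, List.map_map]
      have hf : ((fun k => if k < R + 1 then x else y) ∘ Nat.succ) = (fun k => if k < R then x else y) := by
        funext k
        simp [Function.comp]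
      rw [hf, ih W' x y (by omega), if_pos (by omega)]
      simp [List.replicate_succ]

theorem aAdjust_of_sum (n : Int) (l : List Int) (tpw : List Int) (h : tpw.sum = n) :
    aAdjust n l tpw = tpw := by
  cases l with
  | nil => rfl
  | cons i is => rw [show aAdjust n (i :: is) tpw
      = (if tpw.foldl (· + ·) 0 = n then tpw else aAdjust n is (tpw.modify i.toNat (· + 1))) from rfl,
      if_pos (show tpw.foldl (· + ·) 0 = n by rw [← List.sum_eq_foldl]; exact h)]

theorem adjust_eq (n q : Int) (W R : Nat) (hRW : R < W)
    (hsum : (W : Int) * q + (R : Int) = n) :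
    ∀ (k i : Nat), i + k = R →
      aAdjust n (PySem.List.pyRange (i : Int) (W : Int) 1)
          (List.replicate i (q + 1) ++ List.replicate (W - i) q)
        = List.replicate R (q + 1) ++ List.replicate (W - R) q := by
  intro k
  induction k with
  | zero =>
      intro i hi
      have : i = R := by omega
      subst this
      apply aAdjust_of_sum
      rw [sum_rep_rep]
      push_cast [Nat.cast_sub (le_of_lt hRW)]
      ring_nf
      ring_nf at hsum
      linarith
  | succ k ih =>
      intro i hi
      have hiR : i < R := by omega
      have hiW' : (i : Int) < (W : Int) := by exact_mod_cast (by omega : i < W)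
      rw [PySem.List.pyRange_one_cons hiW']
      have hne : (List.replicate i (q + 1) ++ List.replicate (W - i) q).sum ≠ n := by
        rw [sum_rep_rep]
        push_cast [Nat.cast_sub (by omega : i ≤ W)]
        have : (i : Int) < (R : Int) := by exact_mod_cast hiR
        nlinarith [this, hsum]
      rw [show aAdjust n ((i : Int) :: PySem.List.pyRange ((i : Int) + 1) (W : Int) 1)
            (List.replicate i (q + 1) ++ List.replicate (W - i) q)
          = (if (List.replicate i (q + 1) ++ List.replicate (W - i) q).foldl (· + ·) 0 = n
             then List.replicate i (q + 1) ++ List.replicate (W - i) q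
             else aAdjust n (PySem.List.pyRange ((i : Int) + 1) (W : Int) 1)
               ((List.replicate i (q + 1) ++ List.replicate (W - i) q).modify (i : Int).toNat (· + 1)))
          from rfl, if_neg (show ¬(List.replicate i (q + 1) ++ List.replicate (W - i) q).foldl (· + ·) 0 = n
            by rw [← List.sum_eq_foldl]; exact hne)]
      have hmod : (List.replicate i (q + 1) ++ List.replicate (W - i) q).modify (i : Int).toNat (· + 1)
          = List.replicate (i + 1) (q + 1) ++ List.replicate (W - (i + 1)) q := by
        rw [Int.toNat_natCast]
        have hWi : W - i = (W - (i + 1)) + 1 := by omega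
        rw [hWi, List.replicate_succ]
        have h := modify_append_cons (List.replicate i (q + 1)) q (List.replicate (W - (i + 1)) q) (· + 1)
        rw [List.length_replicate] at h
        rw [h, List.replicate_succ']
        simp [List.append_assoc]
      rw [hmod, show (i : Int) + 1 = ((i + 1 : Nat) : Int) by push_cast; ring]
      exact ih (i + 1) (by omega)

theorem good_shape : ∀ (a : Nat) (b : Nat) (q : Int), 0 ≤ q →
    Good (List.replicate a (q + 1) ++ List.replicate b q) (a * (q.toNat + 1) + b * q.toNat) := by
  intro a
  induction a with
  | zero =>
      intro b
      induction b with
      | zero => intro q _; rw [show 0 * (q.toNat + 1) + 0 * q.toNat = 0 from by omega]; exact good_zero _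
      | succ b ihb =>
          intro q hq
          by_cases hq0 : q.toNat = 0
          · rw [show 0 * (q.toNat + 1) + (b + 1) * q.toNat = 0 from by simp [hq0]]
            exact good_zero _
          · have h1 : 1 ≤ q := by omega
            have : Good (List.replicate (b + 1) q) (0 * (q.toNat + 1) + (b + 1) * q.toNat) := by
              obtain ⟨L, hL⟩ : ∃ L, 0 * (q.toNat + 1) + (b + 1) * q.toNat = L + 1 :=
                ⟨0 * (q.toNat + 1) + (b + 1) * q.toNat - 1, by
                  have : 1 ≤ q.toNat := by omega
                  have : q.toNat ≤ (b + 1) * q.toNat := Nat.le_mul_of_pos_left _ (by omega)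
                  omega⟩
              rw [hL, List.replicate_succ]
              apply good_cons'
              refine ⟨h1, ?_⟩
              have hb' := ihb q hq
              simp only [] at hb' ⊢
              have harith : L + 1 - q.toNat = 0 * (q.toNat + 1) + b * q.toNat := by
                have := hL
                have h2 : (b + 1) * q.toNat = b * q.toNat + q.toNat := by ring
                omega
              rwa [harith]
            simpa using this
  | succ a iha =>
      intro b q hq
      obtain ⟨L, hL⟩ : ∃ L, (a + 1) * (q.toNat + 1) + b * q.toNat = L + 1 :=
        ⟨(a + 1) * (q.toNat + 1) + b * q.toNat - 1, by
          have : q.toNat + 1 ≤ (a + 1) * (q.toNat + 1) := Nat.le_mul_of_pos_left _ (by omega)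
          omega⟩
      rw [hL, List.replicate_succ, List.cons_append]
      apply good_cons'
      refine ⟨by omega, ?_⟩
      have harith : L + 1 - (q + 1).toNat = a * (q.toNat + 1) + b * q.toNat := by
        have h2 : (a + 1) * (q.toNat + 1) = a * (q.toNat + 1) + (q.toNat + 1) := by ring
        have h3 : (q + 1).toNat = q.toNat + 1 := by omega
        omega
      rw [harith]
      exact iha b q hq

theorem split_tasks_agree (tasks : List Int) (w : Int) (hpre : 1 ≤ w ∨ tasks = []) :
    split_tasks tasks w = split_tasks_alt tasks w := by
  by_cases hnil : tasks = []
  · subst hnil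
    rfl
  · have hw : 1 ≤ w := by tauto
    have hw0 : 0 < w := by omega
    set n : Int := (tasks.length : Int) with hn
    set q : Int := PySem.Int.floordiv n w with hqdef
    set r : Int := PySem.Int.mod n w with hrdef
    have hq0 : 0 ≤ q := by
      rw [hqdef, PySem.Int.floordiv_eq_ediv_of_pos hw0]
      exact Int.ediv_nonneg (by positivity) (by omega)
    have hr0 : 0 ≤ r := PySem.Int.mod_nonneg n hw0
    have hrw : r < w := PySem.Int.mod_lt n hw0
    have hid : q * w + r = n := PySem.Int.floordiv_mul_add_mod n w
    set W : Nat := w.toNat with hWdef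
    set R : Nat := r.toNat with hRdef
    have hWw : (W : Int) = w := by omega
    have hRr : (R : Int) = r := by omega
    have hRW : R < W := by omega
    have hN : tasks.length ≠ 0 := by
      intro h; exact hnil (List.length_eq_zero_iff.mp h)
    -- the common size list
    set S : List Int := List.replicate R (q + 1) ++ List.replicate (W - R) q with hSdef
    have hsumWq : (W : Int) * q + (R : Int) = n := by rw [hWw, hRr]; linarith
    -- arithmetic: total size
    have hNat : q.toNat * W + R = tasks.length := by
      have hq' : ((q.toNat : Nat) : Int) = q := by omega
      have : ((q.toNat * W + R : Nat) : Int) = (tasks.length : Int) := by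
        push_cast
        rw [hq', hWw, hRr]
        linarith
      exact_mod_cast this
    have htot : R * (q.toNat + 1) + (W - R) * q.toNat = tasks.length := by
      have e : (W - R) * q.toNat = W * q.toNat - R * q.toNat := Nat.sub_mul ..
      have hle : R * q.toNat ≤ W * q.toNat := Nat.mul_le_mul_right _ (by omega)
      have e2 : R * (q.toNat + 1) = R * q.toNat + R := by ring
      have e3 : W * q.toNat = q.toNat * W := Nat.mul_comm ..
      rw [e, e2, e3]
      omega
    have hgood : Good S tasks.length := by
      rw [hSdef, ← htot]
      exact good_shape R (W - R) q hq0
    -- A side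
    have hA : split_tasks tasks w = fillF S [] tasks := by
      show aShard (aAdjust n (PySem.List.pyRange 0 w 1)
        ((PySem.List.pyRange 0 w 1).map (fun _ => q))) [[]] tasks = fillF S [] tasks
      have htpw0 : (PySem.List.pyRange 0 w 1).map (fun _ => q) = List.replicate W q := by
        rw [PySem.List.pyRange_one, List.map_map]
        rw [show ((fun _ => q) ∘ fun k : Nat => (0 : Int) + k) = (fun _ : Nat => q) from rfl]
        rw [List.map_const']
        simp [hWdef]
      have hadj : aAdjust n (PySem.List.pyRange 0 w 1) (List.replicate W q) = S := by
        have h0 : PySem.List.pyRange 0 w 1 = PySem.List.pyRange ((0 : Nat) : Int) (W : Int) 1 := by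
          rw [hWw]; rfl
        have h1 : List.replicate W q
            = List.replicate 0 (q + 1) ++ List.replicate (W - 0) q := by simp
        rw [h0, h1]
        exact adjust_eq n q W R hRW hsumWq R 0 (by omega)
      rw [htpw0, hadj]
      rw [show ([[]] : List (List Int)) = [] ++ [[]] from rfl, aShard_eq_fill]
      simp
    have hheadS : (0 : Int) ≤ S.headD 0 := by
      rw [hSdef]
      cases hR : R with
      | zero =>
          obtain ⟨W', hW'⟩ : ∃ W', W = W' + 1 := ⟨W - 1, by omega⟩
          simp [hW', List.replicate_succ]
          omega
      | succ R' => simp [List.replicate_succ]; omega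
    have hfc : fillF S [] tasks = chunksB S tasks := by
      have := fill_eq_chunks tasks S [] (by simpa using hnil) (by simpa using hgood)
        (by simpa using hheadS)
      simpa using this
    -- B side
    have hB : split_tasks_alt tasks w = chunksB S tasks := by
      show (if tasks = [] then [[]] else
        bLoop tasks q r (PySem.List.pyRange 0 w 1) [] 0) = chunksB S tasks
      rw [if_neg hnil]
      rw [bLoop_eq tasks q r hq0 (PySem.List.pyRange 0 w 1) [] 0 le_rfl]
      have hmap : (PySem.List.pyRange 0 w 1).map (fun i => if i < r then q + 1 else q) = S := by
        rw [PySem.List.pyRange_one, List.map_map]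
        have hfun : ((fun i : Int => if i < r then q + 1 else q) ∘ fun k : Nat => (0 : Int) + k)
            = (fun k : Nat => if k < R then q + 1 else q) := by
          funext k
          simp only [Function.comp, zero_add]
          congr 1
          rw [← hRr]
          simp [Nat.cast_lt]
        rw [hfun]
        have h1 : (w - 0).toNat = W := by omega
        rw [h1]
        exact range_map_split R W (q + 1) q (by omega)
      rw [hmap]
      simp
    rw [hA, hfc, hB]

-- ===== VERDICT (by name: the statement is the Claim_ definition above) =====
theorem split_tasks_spec : Claim_equal_split_tasks := by
  intro tasks num_workers _hdom hpre
  unfold Spec_split_tasks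
  exact split_tasks_agree tasks num_workers hpre
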